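-- pv_equiv track=rewrite | github.com/sgagou3/HttpWebServer | HTTPServer.py | process_request_token
-- ===== SOURCE A (Python) =====
-- OK = -1
--
-- BAD_REQUEST = 1
--
-- def process_request_token(token):
--     # Ensure the token even exists
--     if len(token) > 0:
--         # Grammar check
--         if token[0] != "/":
--             return BAD_REQUEST
--         for char in token:
--             if (
--                     # Character check
--                     not 48 <= ord(char) <= 57
--                     and not 65 <= ord(char) <= 90
--                     and not 97 <= ord(char) <= 122
--                     and ord(char) != 46
--                     and ord(char) != 47
--                     and ord(char) != 95
--             ):
--                 return BAD_REQUEST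
--     else:
--         return BAD_REQUEST
--     return OK
-- ===== SOURCE B (Python) =====
-- import re
--
-- OK = -1
-- BAD_REQUEST = 1
--
-- _TOKEN_RE = re.compile(r'/[0-9A-Za-z._/]*')
--
-- def process_request_token(token):
--     return OK if _TOKEN_RE.fullmatch(token) else BAD_REQUEST
-- ===== Notes on version B (the rewrite author's own statement) =====
-- stated objective: idiomatic
-- what changed: Replaced the explicit first-character check plus per-character ord-range loop with a single anchored regular expression validated by re.fullmatch.
import Mathlib
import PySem

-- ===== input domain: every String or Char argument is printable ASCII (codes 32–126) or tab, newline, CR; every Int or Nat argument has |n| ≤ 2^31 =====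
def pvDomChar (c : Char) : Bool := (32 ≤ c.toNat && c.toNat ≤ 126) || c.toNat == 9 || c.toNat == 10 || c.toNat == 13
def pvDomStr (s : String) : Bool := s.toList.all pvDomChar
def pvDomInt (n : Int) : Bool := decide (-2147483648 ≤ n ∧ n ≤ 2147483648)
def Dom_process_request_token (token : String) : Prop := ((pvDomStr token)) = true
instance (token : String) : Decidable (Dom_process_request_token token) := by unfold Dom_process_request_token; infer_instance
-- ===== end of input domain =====

-- B validates the token with a single anchored regex pattern (re.fullmatch) instead of A's
-- explicit first-character check plus per-character ord-range loop; objective: idiomatic.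


-- ===== PORT A =====
-- A's per-character condition: the big negated conjunction of the loop body, stated over
-- ord(char) exactly as in the Python source.
def pvBadCharA (c : Char) : Bool :=
  !(48 ≤ c.toNat && c.toNat ≤ 57)
  && !(65 ≤ c.toNat && c.toNat ≤ 90)
  && !(97 ≤ c.toNat && c.toNat ≤ 122)
  && c.toNat ≠ 46
  && c.toNat ≠ 47
  && c.toNat ≠ 95

-- the `for char in token` loop: the first bad character returns BAD_REQUEST = 1, falling
-- off the end of the loop reaches the final `return OK` (= -1).
def pvLoopA : List Char → Int
  | [] => -1
  | c :: rest => if pvBadCharA c then 1 else pvLoopA rest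

def process_request_token (token : String) : Int :=
  if (PySem.Str.len token) > 0 then
    if PySem.Str.pyGet? token 0 ≠ some '/' then 1
    else pvLoopA token.toList
  else 1

-- ===== PORT B =====
-- the regex character class [0-9A-Za-z._/]
def pvClassB (c : Char) : Bool :=
  ('0' ≤ c && c ≤ '9') || ('A' ≤ c && c ≤ 'Z') || ('a' ≤ c && c ≤ 'z')
  || c = '.' || c = '_' || c = '/'

-- _TOKEN_RE.fullmatch(token) with _TOKEN_RE = re.compile(r'/[0-9A-Za-z._/]*'):
-- the whole string is a leading literal '/' followed by zero or more class characters.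
def pvFullmatchTokenRe (token : String) : Bool :=
  match token.toList with
  | '/' :: rest => rest.all pvClassB
  | _ => false

def process_request_token_alt (token : String) : Int :=
  if pvFullmatchTokenRe token then -1 else 1

-- ===== PRECONDITION & SPEC =====
def Spec_process_request_token (token : String) (out : Int) : Prop := out = process_request_token_alt token
instance (token : String) (out : Int) : Decidable (Spec_process_request_token token out) := by unfold Spec_process_request_token; infer_instance

-- ===== CLAIM (what is proved, stated in full; the proofs are below) =====
def Claim_equal_process_request_token : Prop := ∀ (token : String), Dom_process_request_token token → Spec_process_request_token token (process_request_token token)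

-- ===== LEMMAS AND PROOFS =====

theorem char_eq_iff_toNat (c d : Char) : (c = d) ↔ c.toNat = d.toNat :=
  ⟨by rintro rfl; rfl, fun h => Char.ext (UInt32.toNat_inj.mp h)⟩

-- A's loop condition is exactly the negation of B's character class
theorem pvBadCharA_eq_not_class (c : Char) : pvBadCharA c = !pvClassB c := by
  rw [Bool.eq_iff_iff]
  simp only [pvBadCharA, pvClassB, Bool.and_eq_true,
    Bool.not_eq_eq_eq_not, Bool.not_true, Bool.and_eq_false_iff, Bool.or_eq_false_iff,
    decide_eq_true_eq, decide_eq_false_iff_not, char_eq_iff_toNat,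
    show ∀ d : Char, (d ≤ c) ↔ d.toNat ≤ c.toNat from fun _ => Iff.rfl,
    show ∀ d : Char, (c ≤ d) ↔ c.toNat ≤ d.toNat from fun _ => Iff.rfl]
  simp only [show ('0').toNat = 48 from rfl, show ('9').toNat = 57 from rfl,
    show ('A').toNat = 65 from rfl, show ('Z').toNat = 90 from rfl,
    show ('a').toNat = 97 from rfl, show ('z').toNat = 122 from rfl,
    show ('.').toNat = 46 from rfl, show ('_').toNat = 95 from rfl,
    show ('/').toNat = 47 from rfl]
  omega

-- A's loop over a character list returns -1 iff every character is in B's class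
theorem pvLoopA_eq_all (cs : List Char) :
    pvLoopA cs = if cs.all pvClassB then -1 else 1 := by
  induction cs with
  | nil => simp [pvLoopA]
  | cons c rest ih =>
    simp only [pvLoopA, List.all_cons, pvBadCharA_eq_not_class]
    by_cases h : pvClassB c <;> simp [h, ih]

-- ===== VERDICT (by name: the statement is the Claim_ definition above) =====
theorem process_request_token_spec : Claim_equal_process_request_token := by
  intro token _
  unfold Spec_process_request_token process_request_token process_request_token_alt
    pvFullmatchTokenRe
  rcases h : token.toList with _ | ⟨c, rest⟩
  · simp [PySem.Str.len, h]
  · simp only [h, PySem.Str.len_eq, PySem.Str.pyGet?_eq, PySem.Chars.pyGet?_eq_listPyGet?,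
      List.length_cons, PySem.List.pyGet?_zero_cons]
    rw [if_pos (by positivity)]
    by_cases hc : c = '/'
    · subst hc
      rw [if_neg (by simp)]
      simp only [pvLoopA, show pvBadCharA '/' = false from by decide,
        pvLoopA_eq_all]
      rfl
    · rw [if_pos (by simpa using hc)]
      have hm : (match c :: rest with
          | '/' :: r => r.all pvClassB
          | _ => false) = false := by
        split
        · next heq => injection heq with h1 _; exact absurd h1 hc
        · rfl
      rw [hm]
      simp
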